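-- pv_equiv track=rewrite | github.com/bent1e/Monet | src/utils.py | add_abs_vis_token_after_helper_img
-- ===== SOURCE A (Python) =====
-- def add_abs_vis_token_after_helper_img(texts, latent_size, latent_pad_str="<abs_vis_token_pad>"):
--     update_texts = []
--     latent_pad_strs = latent_pad_str*latent_size
--     for i, text in enumerate(texts):
--         turns = text.split("<|im_start|>assistant")
--         upd_text = turns[0]
--         for turn in turns[1:]:
--             upd_text += "<|im_start|>assistant" + turn.replace("<|vision_start|><|image_pad|><|vision_end|>", f"<|vision_start|><|image_pad|><|vision_end|><abs_vis_token>{latent_pad_strs}</abs_vis_token>")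
--         update_texts.append(upd_text)
--     return update_texts
-- ===== SOURCE B (Python) =====
-- def add_abs_vis_token_after_helper_img(texts, latent_size, latent_pad_str="<abs_vis_token_pad>"):
--     marker = "<|im_start|>assistant"
--     vision = "<|vision_start|><|image_pad|><|vision_end|>"
--     expanded = vision + "<abs_vis_token>" + latent_pad_str * latent_size + "</abs_vis_token>"
--     out = []
--     for text in texts:
--         i = text.find(marker)
--         if i == -1:
--             out.append(text)
--         else:
--             cut = i + len(marker)
--             out.append(text[:cut] + text[cut:].replace(vision, expanded))
--     return out
-- ===== Notes on version B (the rewrite author's own statement) =====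
-- stated objective: simpler
-- what changed: Instead of splitting the text into assistant turns and re-accumulating them with a per-turn replace, B locates the first assistant marker once with find and does a single replace over the whole remainder after it (valid because the marker and the vision pattern cannot overlap).
import Mathlib
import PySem

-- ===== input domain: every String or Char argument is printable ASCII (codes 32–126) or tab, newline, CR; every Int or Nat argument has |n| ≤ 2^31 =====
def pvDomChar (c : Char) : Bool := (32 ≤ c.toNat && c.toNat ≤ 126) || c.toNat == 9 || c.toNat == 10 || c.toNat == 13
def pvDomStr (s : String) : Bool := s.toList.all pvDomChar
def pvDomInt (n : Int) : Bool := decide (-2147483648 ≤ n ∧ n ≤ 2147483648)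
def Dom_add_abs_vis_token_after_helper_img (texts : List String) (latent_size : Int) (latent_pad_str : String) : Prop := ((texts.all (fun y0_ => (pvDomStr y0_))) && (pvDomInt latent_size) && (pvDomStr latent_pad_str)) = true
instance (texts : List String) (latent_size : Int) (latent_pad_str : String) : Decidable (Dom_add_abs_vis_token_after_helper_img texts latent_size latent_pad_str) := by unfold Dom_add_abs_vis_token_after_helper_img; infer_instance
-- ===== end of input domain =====

-- B replaces A's split-into-assistant-turns-and-reaccumulate loop by one find of the first
-- assistant marker and a single replace over the remainder after it (objective: simpler).

-- shared string literals of both Python sources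
def pvSep : List Char := "<|im_start|>assistant".toList
def pvVis : List Char := "<|vision_start|><|image_pad|><|vision_end|>".toList
def pvAbsOpen : List Char := "<abs_vis_token>".toList
def pvAbsClose : List Char := "</abs_vis_token>".toList

-- ===== PORT A =====
-- literal transliteration of A: split each text on the assistant marker, keep turns[0],
-- then re-append each turn with the per-turn replace.  splitOn always returns at least one
-- piece, so `headD []` is exactly Python's `turns[0]`.
def add_abs_vis_token_after_helper_img (texts : List String) (latent_size : Int) (latent_pad_str : String) : List String :=
  let latent_pad_strs := PySem.List.pyRepeat latent_pad_str.toList latent_size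
  texts.map (fun text =>
    let turns := PySem.Chars.splitOn text.toList pvSep
    String.ofList (turns.tail.foldl
      (fun acc turn => acc ++ pvSep ++
        PySem.Chars.replace turn pvVis (pvVis ++ pvAbsOpen ++ latent_pad_strs ++ pvAbsClose))
      (turns.headD [])))

-- ===== PORT B =====
-- literal transliteration of B: find the first marker; if absent keep the text, else
-- text[:i+len(marker)] ++ replace over text[i+len(marker):].
def add_abs_vis_token_after_helper_img_alt (texts : List String) (latent_size : Int) (latent_pad_str : String) : List String :=
  let expanded := pvVis ++ pvAbsOpen ++ PySem.List.pyRepeat latent_pad_str.toList latent_size ++ pvAbsClose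
  texts.map (fun text =>
    let i := PySem.Chars.find text.toList pvSep
    if i == -1 then text
    else
      String.ofList (PySem.Chars.slice text.toList none (some (i + PySem.Chars.len pvSep)) ++
        PySem.Chars.replace (PySem.Chars.slice text.toList (some (i + PySem.Chars.len pvSep)) none) pvVis expanded))

-- ===== PRECONDITION & SPEC =====
def Spec_add_abs_vis_token_after_helper_img (texts : List String) (latent_size : Int) (latent_pad_str : String) (out : List String) : Prop := out = add_abs_vis_token_after_helper_img_alt texts latent_size latent_pad_str
instance (texts : List String) (latent_size : Int) (latent_pad_str : String) (out : List String) : Decidable (Spec_add_abs_vis_token_after_helper_img texts latent_size latent_pad_str out) := by unfold Spec_add_abs_vis_token_after_helper_img; infer_instance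

-- ===== CLAIM (what is proved, stated in full; the proofs are below) =====
def Claim_equal_add_abs_vis_token_after_helper_img : Prop := ∀ (texts : List String) (latent_size : Int) (latent_pad_str : String), Dom_add_abs_vis_token_after_helper_img texts latent_size latent_pad_str → Spec_add_abs_vis_token_after_helper_img texts latent_size latent_pad_str (add_abs_vis_token_after_helper_img texts latent_size latent_pad_str)

-- ===== LEMMAS AND PROOFS =====

theorem pvSep_length : pvSep.length = 21 := by decide
theorem pvVis_length : pvVis.length = 43 := by decide

-- clean structural model of Python str.replace with pattern pvVis
def pvRep (R : List Char) : List Char → List Char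
  | [] => []
  | c :: t =>
    if pvVis.isPrefixOf (c :: t) then R ++ pvRep R ((c :: t).drop pvVis.length)
    else c :: pvRep R t
termination_by s => s.length
decreasing_by
  all_goals (simp only [List.length_drop, List.length_cons, pvVis_length]; omega)

-- clean structural model of Python str.split with separator pvSep
def pvSp : List Char → List (List Char)
  | [] => [[]]
  | c :: t =>
    if pvSep.isPrefixOf (c :: t) then [] :: pvSp ((c :: t).drop pvSep.length)
    else
      match pvSp t with
      | [] => [[c]]
      | h :: tl => (c :: h) :: tl
termination_by s => s.length
decreasing_by
  all_goals (simp only [List.length_drop, List.length_cons, pvSep_length]; omega)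

theorem pvRep_go (R : List Char) :
    ∀ (fuel : Nat) (l acc : List Char), l.length ≤ fuel →
      PySem.Chars.replace.go pvVis R fuel l acc = acc.reverse ++ pvRep R l := by
  intro fuel
  induction fuel with
  | zero =>
    intro l acc h
    have hl : l = [] := by cases l with
      | nil => rfl
      | cons c t => simp at h
    subst hl
    simp [PySem.Chars.replace.go, pvRep]
  | succ n ih =>
    intro l acc h
    cases l with
    | nil => simp [PySem.Chars.replace.go, pvRep]
    | cons c t =>
      by_cases hp : pvVis.isPrefixOf (c :: t)
      · rw [PySem.Chars.replace.go, if_pos hp, ih _ _ (by simp [pvVis_length] at h ⊢; omega)]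
        rw [pvRep, if_pos hp]
        simp
      · rw [PySem.Chars.replace.go, if_neg hp, ih _ _ (by simp at h ⊢; omega)]
        rw [pvRep, if_neg hp]
        simp

theorem replace_eq (R s : List Char) :
    PySem.Chars.replace s pvVis R = pvRep R s := by
  rw [PySem.Chars.replace, if_neg (by decide), pvRep_go R s.length s [] le_rfl]
  simp

theorem pvSp_ne_nil (s : List Char) : pvSp s ≠ [] := by
  cases s with
  | nil => simp [pvSp]
  | cons c t =>
    rw [pvSp]
    split
    · simp
    · split <;> simp

-- consH pre prepends pre to the first piece
def consH (pre : List Char) : List (List Char) → List (List Char)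
  | [] => [pre]
  | h :: tl => (pre ++ h) :: tl

theorem splitOn_go :
    ∀ (fuel : Nat) (l cur : List Char) (accL : List (List Char)), l.length < fuel →
      PySem.Chars.splitOn.go pvSep fuel l cur accL = accL.reverse ++ consH cur.reverse (pvSp l) := by
  intro fuel
  induction fuel with
  | zero => intro l cur accL hlt; omega
  | succ n ih =>
    intro l cur accL hlt
    cases l with
    | nil => simp [PySem.Chars.splitOn.go, pvSp, consH]
    | cons c t =>
      by_cases hp : pvSep.isPrefixOf (c :: t)
      · obtain ⟨h0, tl0, hps⟩ := List.exists_cons_of_ne_nil (pvSp_ne_nil ((c :: t).drop pvSep.length))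
        rw [PySem.Chars.splitOn.go, if_pos hp,
          ih _ [] _ (by simp [pvSep_length] at hlt ⊢; omega), hps]
        rw [pvSp, if_pos hp, hps]
        simp [consH]
      · obtain ⟨h0, tl0, hps⟩ := List.exists_cons_of_ne_nil (pvSp_ne_nil t)
        rw [PySem.Chars.splitOn.go, if_neg hp,
          ih t (c :: cur) accL (by simp at hlt ⊢; omega)]
        rw [pvSp, if_neg hp, hps]
        simp [consH]

theorem splitOn_eq (s : List Char) : PySem.Chars.splitOn s pvSep = pvSp s := by
  obtain ⟨h0, tl0, hps⟩ := List.exists_cons_of_ne_nil (pvSp_ne_nil s)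
  rw [PySem.Chars.splitOn, splitOn_go (s.length + 1) s [] [] (by omega), hps]
  simp [consH]

theorem pvSp_join : ∀ s : List Char, pvSep.intercalate (pvSp s) = s := by
  intro s
  induction s using pvSp.induct with
  | case1 => simp [pvSp, List.intercalate]
  | case2 c t hp ih =>
    rw [pvSp, if_pos hp]
    obtain ⟨h0, tl0, hps⟩ := List.exists_cons_of_ne_nil (pvSp_ne_nil ((c :: t).drop pvSep.length))
    rw [hps] at ih ⊢
    rw [show pvSep.intercalate ([] :: h0 :: tl0) = pvSep ++ pvSep.intercalate (h0 :: tl0) from rfl, ih]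
    exact (List.prefix_iff_eq_append.mp (List.isPrefixOf_iff_prefix.mp hp))
  | case3 c t hp hnil ih =>
    exact absurd hnil (pvSp_ne_nil t)
  | case4 c t hp h0 tl0 hps ih =>
    rw [pvSp, if_neg hp, hps]
    rw [hps] at ih
    cases tl0 with
    | nil => simp [List.intercalate] at ih ⊢; exact ih
    | cons x xs =>
      rw [show pvSep.intercalate ((c :: h0) :: x :: xs) = (c :: h0) ++ (pvSep ++ pvSep.intercalate (x :: xs)) from rfl]
      rw [show pvSep.intercalate (h0 :: x :: xs) = h0 ++ (pvSep ++ pvSep.intercalate (x :: xs)) from rfl] at ih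
      simp only [List.cons_append] at ih ⊢
      rw [ih]

theorem pvSp_head : ∀ (s h : List Char) (tl : List (List Char)),
    pvSp s = h :: tl → h <+: s ∧ ¬ pvSep <:+: h := by
  intro s
  induction s using pvSp.induct with
  | case1 =>
    intro h tl heq
    rw [pvSp] at heq
    injection heq with e1 e2
    subst e1
    exact ⟨List.nil_prefix, by simp [List.infix_nil]; decide⟩
  | case2 c t hp ih =>
    intro h tl heq
    rw [pvSp, if_pos hp] at heq
    injection heq with e1 e2
    subst e1
    exact ⟨List.nil_prefix, by simp [List.infix_nil]; decide⟩
  | case3 c t hp hnil ih =>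
    exact absurd hnil (pvSp_ne_nil t)
  | case4 c t hp h0 tl0 hps ih =>
    intro h tl heq
    rw [pvSp, if_neg hp, hps] at heq
    injection heq with e1 e2
    subst e1 e2
    obtain ⟨ihp, ihni⟩ := ih h0 tl0 hps
    constructor
    · exact (List.prefix_cons_inj c).mpr ihp
    · intro hinf
      rcases List.infix_cons_iff.mp hinf with hpre | hinf2
      · exact hp (List.isPrefixOf_iff_prefix.mpr (hpre.trans ((List.prefix_cons_inj c).mpr ihp)))
      · exact ihni hinf2

theorem pvSp_infix_tail : ∀ (s h : List Char) (tl : List (List Char)),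
    pvSp s = h :: tl → pvSep <:+: s → tl ≠ [] := by
  intro s
  induction s using pvSp.induct with
  | case1 =>
    intro h tl heq hinf
    rw [List.infix_nil] at hinf
    exact absurd hinf (by decide)
  | case2 c t hp ih =>
    intro h tl heq hinf
    rw [pvSp, if_pos hp] at heq
    injection heq with e1 e2
    rw [← e2]
    exact pvSp_ne_nil _
  | case3 c t hp hnil ih =>
    exact absurd hnil (pvSp_ne_nil t)
  | case4 c t hp h0 tl0 hps ih =>
    intro h tl heq hinf
    rw [pvSp, if_neg hp, hps] at heq
    injection heq with e1 e2
    rw [← e2]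
    rcases List.infix_cons_iff.mp hinf with hpre | hinf2
    · exact absurd (List.isPrefixOf_iff_prefix.mpr hpre) hp
    · exact ih h0 tl0 hps hinf2

-- no-overlap facts between the two concrete tokens (checked by the kernel)
theorem factA : ∀ j : Nat, j < 43 → ¬ (pvVis.drop j <+: pvSep) := by decide
theorem factB : ∀ j : Nat, j < 43 → ¬ (pvSep <+: pvVis.drop j) := by decide
theorem factC : ∀ n : Nat, n < 22 → 1 ≤ n → pvSep.drop (21 - n) ≠ pvVis.take n := by decide
theorem factD : ∀ q : Nat, q < 21 → 1 ≤ q → pvSep.drop q ≠ pvSep.take (21 - q) := by decide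

theorem drop_append_of_le {l1 l2 : List Char} {n : Nat} (h : n ≤ l1.length) :
    (l1 ++ l2).drop n = l1.drop n ++ l2 := by
  rw [List.drop_append, Nat.sub_eq_zero_of_le h, List.drop_zero]

theorem prefix_append_left_iff {p x u : List Char} (h : p.length ≤ x.length) :
    p <+: x ++ u ↔ p <+: x := by
  constructor
  · intro hp
    exact List.prefix_of_prefix_length_le hp (List.prefix_append x u) h
  · intro hp
    exact hp.trans (List.prefix_append x u)

-- the vision pattern cannot start inside x and run into pvSep
theorem no_cross (x y : List Char) (hx : x.length < pvVis.length) :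
    ¬ pvVis <+: x ++ (pvSep ++ y) := by
  intro hp
  have hxp : x <+: pvVis :=
    List.prefix_of_prefix_length_le (List.prefix_append x _) hp (le_of_lt hx)
  have hsplit : pvVis = x ++ pvVis.drop x.length := by
    conv_lhs => rw [← List.take_append_drop x.length pvVis, ← List.prefix_iff_eq_take.mp hxp]
  have h2 : pvVis.drop x.length <+: pvSep ++ y := by
    rw [hsplit] at hp
    exact (List.prefix_append_right_inj x).mp hp
  by_cases hm : (pvVis.drop x.length).length ≤ pvSep.length
  · exact factA x.length (by rw [pvVis_length] at hx; omega)
      ((prefix_append_left_iff hm).mp h2)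
  · rw [Nat.not_le] at hm
    exact factB x.length (by rw [pvVis_length] at hx; omega)
      (List.prefix_of_prefix_length_le (List.prefix_append _ _) h2 (le_of_lt hm))

-- the vision pattern cannot start inside pvSep
theorem no_sep_start (z y : List Char) (hz : z <:+ pvSep) (hne : z ≠ []) :
    ¬ pvVis <+: z ++ y := by
  intro hp
  have hzlen : z.length ≤ 21 := by
    have := hz.length_le
    rw [pvSep_length] at this
    exact this
  have hzp : z <+: pvVis :=
    List.prefix_of_prefix_length_le (List.prefix_append z y) hp (by rw [pvVis_length]; omega)
  have h1 : z = pvVis.take z.length := List.prefix_iff_eq_take.mp hzp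
  have h2 : z = pvSep.drop (pvSep.length - z.length) := List.suffix_iff_eq_drop.mp hz
  refine factC z.length (by omega) (List.length_pos_iff.mpr hne) ?_
  rw [← pvSep_length, ← h2, ← h1]

theorem pvRep_sep_suffix (R : List Char) :
    ∀ z y : List Char, z <:+ pvSep → pvRep R (z ++ y) = z ++ pvRep R y := by
  intro z
  induction z with
  | nil => intro y _; simp
  | cons c z' ih =>
    intro y hz
    have hz' : z' <:+ pvSep := (List.suffix_cons c z').trans hz
    have hnp : ¬ pvVis.isPrefixOf (c :: (z' ++ y)) := by
      rw [List.isPrefixOf_iff_prefix, ← List.cons_append]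
      exact no_sep_start (c :: z') y hz (by simp)
    rw [List.cons_append, pvRep, if_neg hnp, ih y hz', List.cons_append]

theorem pvRep_split (R : List Char) :
    ∀ (n : Nat) (x y : List Char), x.length ≤ n →
      pvRep R (x ++ (pvSep ++ y)) = pvRep R x ++ (pvSep ++ pvRep R y) := by
  intro n
  induction n with
  | zero =>
    intro x y hxn
    have hx : x = [] := by
      cases x with
      | nil => rfl
      | cons c t => simp at hxn
    subst hx
    simpa [pvRep] using pvRep_sep_suffix R pvSep y List.suffix_rfl
  | succ n ih =>
    intro x y hxn
    cases x with
    | nil => simpa [pvRep] using pvRep_sep_suffix R pvSep y List.suffix_rfl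
    | cons c t =>
      by_cases hp : pvVis <+: (c :: t) ++ (pvSep ++ y)
      · have hx43 : pvVis.length ≤ (c :: t).length := by
          by_contra hlt
          rw [Nat.not_le] at hlt
          exact no_cross (c :: t) y hlt hp
        have hpx : pvVis <+: (c :: t) := (prefix_append_left_iff hx43).mp hp
        have hd : ((c :: t) ++ (pvSep ++ y)).drop pvVis.length
            = (c :: t).drop pvVis.length ++ (pvSep ++ y) := drop_append_of_le hx43
        rw [show pvRep R ((c :: t) ++ (pvSep ++ y))
              = R ++ pvRep R (((c :: t) ++ (pvSep ++ y)).drop pvVis.length) from by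
            rw [List.cons_append, pvRep,
              if_pos (by rw [List.isPrefixOf_iff_prefix, ← List.cons_append]; exact hp)]]
        rw [show pvRep R (c :: t) = R ++ pvRep R ((c :: t).drop pvVis.length) from by
            rw [pvRep, if_pos (List.isPrefixOf_iff_prefix.mpr hpx)]]
        rw [hd, ih _ y (by simp [pvVis_length] at hxn ⊢; omega)]
        simp [List.append_assoc]
      · have hp2 : ¬ pvVis <+: (c :: t) := fun hc => hp (hc.trans (List.prefix_append _ _))
        rw [show pvRep R ((c :: t) ++ (pvSep ++ y))
              = c :: pvRep R (t ++ (pvSep ++ y)) from by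
            rw [List.cons_append, pvRep,
              if_neg (by rw [List.isPrefixOf_iff_prefix, ← List.cons_append]; exact hp)]]
        rw [show pvRep R (c :: t) = c :: pvRep R t from by
            rw [pvRep, if_neg (by rw [List.isPrefixOf_iff_prefix]; exact hp2)]]
        rw [ih t y (by simp at hxn; omega)]
        simp

-- no occurrence of pvSep starts strictly before the head piece ends
theorem no_early (h r : List Char) (hni : ¬ pvSep <:+: h) :
    ∀ j : Nat, j < h.length → ¬ pvSep <+: (h ++ (pvSep ++ r)).drop j := by
  intro j hj hp
  have hdrop : (h ++ (pvSep ++ r)).drop j = h.drop j ++ (pvSep ++ r) :=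
    drop_append_of_le (le_of_lt hj)
  rw [hdrop] at hp
  have hq : 0 < (h.drop j).length := by simp; omega
  by_cases hc : pvSep.length ≤ (h.drop j).length
  · have hps : pvSep <+: h.drop j := (prefix_append_left_iff hc).mp hp
    exact hni (hps.isInfix.trans (List.drop_suffix j h).isInfix)
  · rw [Nat.not_le] at hc
    have hdp : h.drop j <+: pvSep :=
      List.prefix_of_prefix_length_le (List.prefix_append _ _) hp (le_of_lt hc)
    have hsep_split : pvSep = h.drop j ++ pvSep.drop (h.drop j).length := by
      conv_lhs => rw [← List.take_append_drop (h.drop j).length pvSep,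
        ← List.prefix_iff_eq_take.mp hdp]
    have h2 : pvSep.drop (h.drop j).length <+: pvSep ++ r := by
      nth_rewrite 1 [hsep_split] at hp
      exact (List.prefix_append_right_inj (h.drop j)).mp hp
    have h3 : pvSep.drop (h.drop j).length <+: pvSep :=
      (prefix_append_left_iff (by simp)).mp h2
    refine factD (h.drop j).length (by rw [pvSep_length] at hc; omega) hq ?_
    have h5 := List.prefix_iff_eq_take.mp h3
    simp only [List.length_drop, pvSep_length] at h5 ⊢
    exact h5

theorem find_head (h r : List Char) (hni : ¬ pvSep <:+: h) :
    PySem.Chars.find (h ++ (pvSep ++ r)) pvSep = (h.length : Int) := by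
  have hinf : pvSep <:+: h ++ (pvSep ++ r) := ⟨h, r, by simp⟩
  have h0 : 0 ≤ PySem.Chars.find (h ++ (pvSep ++ r)) pvSep :=
    (PySem.Chars.find_nonneg_iff _ _).mpr hinf
  obtain ⟨hocc, hmin⟩ := PySem.Chars.find_spec h0
  have hfe : (PySem.Chars.find (h ++ (pvSep ++ r)) pvSep).toNat = h.length := by
    rcases lt_trichotomy (PySem.Chars.find (h ++ (pvSep ++ r)) pvSep).toNat h.length with hlt | heq | hgt
    · exact absurd hocc (no_early h r hni _ hlt)
    · exact heq
    · exfalso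
      apply hmin h.length hgt
      rw [List.drop_left]
      exact List.prefix_append _ _
  rw [← Int.toNat_of_nonneg h0, hfe]

theorem foldA (R0 : List Char) :
    ∀ (tl : List (List Char)) (acc : List Char),
      tl.foldl (fun acc turn => acc ++ pvSep ++ PySem.Chars.replace turn pvVis R0) acc
        = acc ++ (tl.map (fun u => pvSep ++ pvRep R0 u)).flatten := by
  intro tl
  induction tl with
  | nil => intro acc; simp
  | cons u rest ih =>
    intro acc
    rw [List.foldl_cons, ih]
    simp [replace_eq, List.append_assoc]

theorem interRep (R0 : List Char) :
    ∀ (rest : List (List Char)) (u : List Char),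
      pvRep R0 (pvSep.intercalate (u :: rest))
        = pvRep R0 u ++ (rest.map (fun v => pvSep ++ pvRep R0 v)).flatten := by
  intro rest
  induction rest with
  | nil => intro u; simp [List.intercalate]
  | cons v r ih =>
    intro u
    rw [show pvSep.intercalate (u :: v :: r) = u ++ (pvSep ++ pvSep.intercalate (v :: r)) from rfl]
    rw [pvRep_split R0 u.length u _ le_rfl, ih v]
    simp [List.append_assoc]

theorem perText (R0 : List Char) (s : List Char) :
    ((PySem.Chars.splitOn s pvSep).tail.foldl
        (fun acc turn => acc ++ pvSep ++ PySem.Chars.replace turn pvVis R0)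
        ((PySem.Chars.splitOn s pvSep).headD []))
    = (if PySem.Chars.find s pvSep == -1 then s
       else PySem.Chars.slice s none (some (PySem.Chars.find s pvSep + PySem.Chars.len pvSep)) ++
            PySem.Chars.replace
              (PySem.Chars.slice s (some (PySem.Chars.find s pvSep + PySem.Chars.len pvSep)) none)
              pvVis R0) := by
  obtain ⟨h, tl, hps⟩ := List.exists_cons_of_ne_nil (pvSp_ne_nil s)
  rw [splitOn_eq, hps]
  cases tl with
  | nil =>
    have hs : h = s := by
      have := pvSp_join s
      rw [hps] at this
      simpa [List.intercalate] using this
    have hninf : ¬ pvSep <:+: s := fun hinf => (pvSp_infix_tail s h [] hps hinf) rfl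
    have hfind : PySem.Chars.find s pvSep = -1 := (PySem.Chars.find_eq_neg_one_iff _ _).mpr hninf
    simp [hfind, hs]
  | cons x xs =>
    have hni : ¬ pvSep <:+: h := (pvSp_head s h _ hps).2
    have hsplit : s = h ++ (pvSep ++ pvSep.intercalate (x :: xs)) := by
      have := pvSp_join s
      rw [hps] at this
      rw [← this]
      rfl
    have hfind : PySem.Chars.find s pvSep = (h.length : Int) := by
      rw [hsplit]
      exact find_head h _ hni
    have hne : ((h.length : Int) == -1) = false := by
      simp only [beq_eq_false_iff_ne, ne_eq]
      omega
    have hcut : (h.length : Int) + PySem.Chars.len pvSep = ((h.length + 21 : Nat) : Int) := by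
      rw [PySem.Chars.len_eq, pvSep_length]
      push_cast
      ring
    have hslice1 : PySem.Chars.slice s none (some ((h.length : Int) + PySem.Chars.len pvSep))
        = h ++ pvSep := by
      rw [hcut, PySem.Chars.slice_eq_listSlice, PySem.List.slice_to _ (by positivity),
        Int.toNat_natCast, hsplit, show h ++ (pvSep ++ pvSep.intercalate (x :: xs))
          = (h ++ pvSep) ++ pvSep.intercalate (x :: xs) from by simp,
        List.take_left' (by simp [pvSep_length])]
    have hslice2 : PySem.Chars.slice s (some ((h.length : Int) + PySem.Chars.len pvSep)) none
        = pvSep.intercalate (x :: xs) := by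
      rw [hcut, PySem.Chars.slice_eq_listSlice, PySem.List.slice_from _ (by positivity),
        Int.toNat_natCast, hsplit, show h ++ (pvSep ++ pvSep.intercalate (x :: xs))
          = (h ++ pvSep) ++ pvSep.intercalate (x :: xs) from by simp,
        List.drop_left' (by simp [pvSep_length])]
    rw [hfind, if_neg (by simp [hne]), hslice1, hslice2, List.tail_cons, List.headD_cons,
      foldA R0 (x :: xs) h, replace_eq, interRep R0 xs x]
    simp [List.append_assoc]

-- ===== VERDICT (by name: the statement is the Claim_ definition above) =====
theorem add_abs_vis_token_after_helper_img_spec : Claim_equal_add_abs_vis_token_after_helper_img := by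
  intro texts latent_size latent_pad_str _
  unfold Spec_add_abs_vis_token_after_helper_img
  unfold add_abs_vis_token_after_helper_img add_abs_vis_token_after_helper_img_alt
  refine List.map_congr_left fun text _ => ?_
  dsimp only
  rw [perText (pvVis ++ pvAbsOpen ++ PySem.List.pyRepeat latent_pad_str.toList latent_size ++ pvAbsClose)
    text.toList]
  by_cases hf : (PySem.Chars.find text.toList pvSep == -1) = true
  · simp [hf, String.ofList_toList]
  · simp [hf]
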